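-- pv_equiv track=rewrite | github.com/facebookresearch/eai-vc | eval/trifinger/rl-utils/rl_utils/launcher/run_exp.py | split_cmd
-- ===== SOURCE A (Python) =====
-- def split_cmd(cmd):
--     cmd_parts = cmd.split(" ")
--     ret_cmds = [[]]
--     for cmd_part in cmd_parts:
--         prefix = ""
--         if "=" in cmd_part:
--             prefix, cmd_part = cmd_part.split("=")
--             prefix += "="
--
--         if "," in cmd_part:
--             ret_cmds = [
--                 ret_cmd + [prefix + split_part]
--                 for ret_cmd in ret_cmds
--                 for split_part in cmd_part.split(",")
--             ]
--         else:
--             ret_cmds = [ret_cmd + [prefix + cmd_part] for ret_cmd in ret_cmds]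
--     return [" ".join(ret_cmd) for ret_cmd in ret_cmds]
-- ===== SOURCE B (Python) =====
-- def _token_choices(tok):
--     # per-token list of option strings; keeps the bare tuple-unpack so a
--     # token with two '=' raises ValueError exactly like the original
--     if "=" in tok:
--         prefix, rest = tok.split("=")
--         return [prefix + "=" + p for p in rest.split(",")]
--     return tok.split(",")
--
--
-- def _product(choices):
--     # Cartesian product of a list of lists, front-recursive
--     if not choices:
--         return [[]]
--     rest = _product(choices[1:])
--     return [[x] + r for x in choices[0] for r in rest]
--
--
-- def split_cmd(cmd):
--     choices = [_token_choices(tok) for tok in cmd.split(" ")]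
--     return [" ".join(combo) for combo in _product(choices)]
-- ===== Notes on version B (the rewrite author's own statement) =====
-- stated objective: alternative
-- what changed: B first maps each token to its full list of option strings, then enumerates the Cartesian product by recursion on the token list, instead of A's single interleaved loop that regrows the whole partial-command list at every token.
import Mathlib
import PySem

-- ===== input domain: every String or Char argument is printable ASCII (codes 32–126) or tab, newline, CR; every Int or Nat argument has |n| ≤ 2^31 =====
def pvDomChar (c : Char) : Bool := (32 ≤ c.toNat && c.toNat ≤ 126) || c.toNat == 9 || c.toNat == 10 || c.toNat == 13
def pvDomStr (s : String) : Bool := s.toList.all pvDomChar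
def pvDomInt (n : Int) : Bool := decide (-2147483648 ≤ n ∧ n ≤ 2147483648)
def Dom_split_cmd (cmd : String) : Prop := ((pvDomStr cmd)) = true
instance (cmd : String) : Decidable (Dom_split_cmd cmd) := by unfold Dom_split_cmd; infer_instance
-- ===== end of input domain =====

-- B re-decomposes A: a per-token option table followed by a recursive Cartesian product,
-- instead of A's single loop that regrows the list of partial commands at each token (alternative decomposition, same cost).

-- Python's s.split(sep) for a nonempty separator (shared primitive wrapper)
def pySplit (s sep : String) : List String := (PySem.Str.split? s sep).getD [s]

-- ===== PORT A =====
-- loop body of A's 'for cmd_part in cmd_parts'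
def stepA (ret_cmds : List (List String)) (cmd_part0 : String) : List (List String) :=
  let pp : String × String :=
    if PySem.Str.isIn "=" cmd_part0 then
      let ps := pySplit cmd_part0 "="
      (ps.getD 0 "" ++ "=", ps.getD 1 "")
    else ("", cmd_part0)
  let pre := pp.1
  let cmd_part := pp.2
  if PySem.Str.isIn "," cmd_part then
    ret_cmds.flatMap (fun rc => (pySplit cmd_part ",").map (fun sp => rc ++ [pre ++ sp]))
  else
    ret_cmds.map (fun rc => rc ++ [pre ++ cmd_part])

def split_cmd (cmd : String) : List String :=
  ((pySplit cmd " ").foldl stepA [[]]).map (fun rc => PySem.Str.join " " rc)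

-- ===== PORT B =====
def tokenChoices (tok : String) : List String :=
  if PySem.Str.isIn "=" tok then
    let ps := pySplit tok "="
    let pre := ps.getD 0 ""
    let rest := ps.getD 1 ""
    (pySplit rest ",").map (fun p => pre ++ "=" ++ p)
  else
    pySplit tok ","

def prodCombos : List (List String) → List (List String)
  | [] => [[]]
  | c :: cs => c.flatMap (fun x => (prodCombos cs).map (fun r => x :: r))

def split_cmd_alt (cmd : String) : List String :=
  (prodCombos ((pySplit cmd " ").map tokenChoices)).map (fun combo => PySem.Str.join " " combo)

-- ===== PRECONDITION & SPEC =====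
-- Pre_ excludes exactly the inputs on which Python A raises ValueError (and B raises it too):
-- a space-separated token in which the equals sign occurs at least twice makes A's 2-tuple unpack fail.
def Pre_split_cmd (cmd : String) : Prop :=
  ∀ t ∈ pySplit cmd " ", PySem.Str.count t "=" ≤ 1
instance (cmd : String) : Decidable (Pre_split_cmd cmd) := by unfold Pre_split_cmd; infer_instance

def pvWitness_split_cmd : String := "a=1,2 b c=x,y"

def Spec_split_cmd (cmd : String) (out : List String) : Prop := out = split_cmd_alt cmd
instance (cmd : String) (out : List String) : Decidable (Spec_split_cmd cmd out) := by unfold Spec_split_cmd; infer_instance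

-- ===== CLAIM (what is proved, stated in full; the proofs are below) =====
def Claim_equal_split_cmd : Prop := ∀ (cmd : String), Dom_split_cmd cmd → Pre_split_cmd cmd → Spec_split_cmd cmd (split_cmd cmd)

-- ===== LEMMAS AND PROOFS =====

-- splitOn.go never finds the separator when it is not an infix of the remaining input
lemma splitOn_go_of_not_infix (sep : List Char) :
    ∀ (l : List Char) (fuel : Nat) (cur : List Char) (acc : List (List Char)),
      l.length ≤ fuel → ¬ sep <:+: l →
      PySem.Chars.splitOn.go sep fuel l cur acc = ((cur.reverse ++ l) :: acc).reverse := by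
  intro l
  induction l with
  | nil =>
    intro fuel cur acc _ _
    cases fuel <;> simp [PySem.Chars.splitOn.go]
  | cons c rest ih =>
    intro fuel cur acc hlen hinf
    cases fuel with
    | zero => simp at hlen
    | succ f =>
      have hpre : sep.isPrefixOf (c :: rest) = false := by
        by_contra h
        exact hinf (List.IsPrefix.isInfix (List.isPrefixOf_iff_prefix.mp (by
          revert h; cases sep.isPrefixOf (c :: rest) <;> simp)))
      rw [PySem.Chars.splitOn.go]
      rw [if_neg (by simp [hpre])]
      rw [ih f (c :: cur) acc (by simpa using Nat.lt_succ_iff.mp (Nat.lt_of_lt_of_le (Nat.lt_succ_self _) hlen))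
        (fun h => hinf (h.trans (List.suffix_cons c rest).isInfix))]
      simp

lemma splitOn_of_not_infix (s sep : List Char) (h : ¬ sep <:+: s) :
    PySem.Chars.splitOn s sep = [s] := by
  unfold PySem.Chars.splitOn
  rw [splitOn_go_of_not_infix sep s (s.length + 1) [] [] (Nat.le_succ _) h]
  simp

-- Python's p.split(sep): if sep does not occur in p, the result is [p]
lemma pySplit_of_not_isIn (p : String) (sep : String)
    (h : PySem.Str.isIn sep p = false) : pySplit p sep = [p] := by
  have hinf : ¬ sep.toList <:+: p.toList := by
    rw [PySem.Str.isIn_eq] at h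
    exact (PySem.Chars.isIn_eq_false_iff _ _).mp h
  have hne : sep.toList.isEmpty = false := by
    cases hsep : sep.toList.isEmpty
    · rfl
    · rw [List.isEmpty_iff.mp hsep] at hinf
      exact absurd List.nil_infix hinf
  rw [pySplit, PySem.Str.split?, PySem.Chars.split?, hne]
  rw [if_neg (by simp), splitOn_of_not_infix _ _ hinf]
  simp

-- l.flatMap (fun x => [g x]) = l.map g, used to fold singleton choice lists
lemma flatMap_singleton_fun {A B : Type} (l : List A) (g : A → B) :
    l.flatMap (fun x => [g x]) = l.map g := by
  induction l with
  | nil => rfl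
  | cons a t ih => simp [ih]

-- A's loop body = "extend every partial command by every choice of this token"
lemma stepA_eq_choices (rcs : List (List String)) (tok : String) :
    stepA rcs tok = rcs.flatMap (fun rc => (tokenChoices tok).map (fun s => rc ++ [s])) := by
  unfold stepA tokenChoices
  by_cases he : PySem.Str.isIn "=" tok
  · simp only [he, if_true]
    by_cases hc : PySem.Str.isIn "," ((pySplit tok "=").getD 1 "")
    · rw [if_pos hc]
      simp [List.map_map, Function.comp_def, String.append_assoc]
    · rw [if_neg hc, pySplit_of_not_isIn _ "," (by simpa using hc)]
      simp only [List.map_singleton]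
      rw [flatMap_singleton_fun]
  · simp only [he, if_false, Bool.false_eq_true]
    by_cases hc : PySem.Str.isIn "," tok
    · rw [if_pos hc]
      simp [String.empty_append]
    · rw [if_neg hc, pySplit_of_not_isIn _ "," (by simpa using hc)]
      simp only [List.map_singleton]
      rw [flatMap_singleton_fun]
      simp [String.empty_append]

-- A's whole loop = append the Cartesian product of the remaining tokens' choices
lemma foldl_stepA (toks : List String) :
    ∀ acc : List (List String),
      toks.foldl stepA acc
        = acc.flatMap (fun rc => (prodCombos (toks.map tokenChoices)).map (fun c => rc ++ c)) := by
  induction toks with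
  | nil =>
    intro acc
    simp only [List.map_nil, prodCombos, List.map_singleton, List.append_nil]
    rw [flatMap_singleton_fun]
    simp
  | cons t ts ih =>
    intro acc
    rw [List.foldl_cons, ih, stepA_eq_choices]
    simp only [List.map_cons, prodCombos, List.flatMap_assoc, List.flatMap_map,
      List.map_flatMap, List.map_map]
    apply List.flatMap_congr
    intro rc _
    simp [Function.comp_def, List.append_assoc]

-- ===== VERDICT (by name: the statement is the Claim_ definition above) =====
theorem split_cmd_spec : Claim_equal_split_cmd := by
  intro cmd _ _
  unfold Spec_split_cmd split_cmd split_cmd_alt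
  rw [foldl_stepA]
  simp [List.flatMap]
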